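-- pv_equiv track=rewrite | github.com/danilokacanski/sausau | first_part/code/w06/priprema za k1.py | imaPrelaznuOcenu
-- ===== SOURCE A (Python) =====
-- def imaPrelaznuOcenu(radni_sati):
--     uzastopni_dani = 0
--
--     for sati in radni_sati:
--         if sati >= 7:
--             uzastopni_dani += 1
--             if uzastopni_dani == 5:
--                 return True
--         else:
--             uzastopni_dani = 0
--
--     return False
-- ===== SOURCE B (Python) =====
-- def imaPrelaznuOcenu(radni_sati):
--     bits = ''.join('1' if sati >= 7 else '0' for sati in radni_sati)
--     return '11111' in bits
-- ===== Notes on version B (the rewrite author's own statement) =====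
-- stated objective: idiomatic
-- what changed: Replaced the explicit consecutive-day counter with a map to a '0'/'1' bitstring followed by a single substring test '11111' in bits.
import Mathlib
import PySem

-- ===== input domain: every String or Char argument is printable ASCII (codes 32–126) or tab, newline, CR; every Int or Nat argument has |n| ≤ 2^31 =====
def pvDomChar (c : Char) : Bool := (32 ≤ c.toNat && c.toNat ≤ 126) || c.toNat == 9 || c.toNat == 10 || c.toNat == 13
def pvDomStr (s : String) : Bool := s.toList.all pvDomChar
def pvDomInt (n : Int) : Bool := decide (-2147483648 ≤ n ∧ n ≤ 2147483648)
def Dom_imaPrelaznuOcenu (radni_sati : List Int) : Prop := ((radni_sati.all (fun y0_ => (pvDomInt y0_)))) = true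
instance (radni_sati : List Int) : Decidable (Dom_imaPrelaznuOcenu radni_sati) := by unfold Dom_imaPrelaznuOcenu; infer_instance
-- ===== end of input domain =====

-- B replaces A's explicit consecutive-day counter with a map to a '0'/'1' bitstring
-- followed by a single substring test ('11111' in bits); objective: idiomatic.

-- ===== PORT A =====
-- the for-loop of A with its counter `uzastopni_dani` and early return
def imaGo : List Int → Nat → Bool
  | [], _ => false
  | sati :: rest, uzastopni_dani =>
      if sati ≥ 7 then
        if uzastopni_dani + 1 = 5 then true else imaGo rest (uzastopni_dani + 1)
      else imaGo rest 0

def imaPrelaznuOcenu (radni_sati : List Int) : Bool := imaGo radni_sati 0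

-- ===== PORT B =====
-- bits = ''.join('1' if sati >= 7 else '0' for sati in radni_sati); return '11111' in bits
def imaPrelaznuOcenu_alt (radni_sati : List Int) : Bool :=
  let bits := radni_sati.map (fun sati => if sati ≥ 7 then '1' else '0')
  decide (['1', '1', '1', '1', '1'] <:+: bits)

-- ===== PRECONDITION & SPEC =====
def Spec_imaPrelaznuOcenu (radni_sati : List Int) (out : Bool) : Prop := out = imaPrelaznuOcenu_alt radni_sati
instance (radni_sati : List Int) (out : Bool) : Decidable (Spec_imaPrelaznuOcenu radni_sati out) := by unfold Spec_imaPrelaznuOcenu; infer_instance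

-- ===== CLAIM (what is proved, stated in full; the proofs are below) =====
def Claim_equal_imaPrelaznuOcenu : Prop := ∀ (radni_sati : List Int), Dom_imaPrelaznuOcenu radni_sati → Spec_imaPrelaznuOcenu radni_sati (imaPrelaznuOcenu radni_sati)

-- ===== LEMMAS AND PROOFS =====

def pvBits (l : List Int) : List Char := l.map (fun sati => if sati ≥ 7 then '1' else '0')

lemma pvRepl_prefix_repl (m n : Nat) (h : m ≤ n) :
    List.replicate m '1' <+: List.replicate n '1' := by
  refine ⟨List.replicate (n - m) '1', ?_⟩
  rw [← List.replicate_add]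
  congr 1
  omega

-- loop invariant: A's loop from counter c answers "a run of 5-c ones starts right here,
-- or a run of 5 ones occurs anywhere"
lemma imaGo_eq (l : List Int) : ∀ (c : Nat), c < 5 →
    imaGo l c = decide (List.replicate (5 - c) '1' <+: pvBits l ∨
                        List.replicate 5 '1' <:+: pvBits l) := by
  induction l with
  | nil =>
      intro c hc
      have h5 : 5 - c = (4 - c) + 1 := by omega
      simp [imaGo, pvBits, h5, List.replicate_succ]
  | cons s rest ih =>
      intro c hc
      by_cases hs : s ≥ 7
      · have hb : pvBits (s :: rest) = '1' :: pvBits rest := by simp [pvBits, hs]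
        by_cases h5 : c + 1 = 5
        · have hc4 : 5 - c = 1 := by omega
          simp [imaGo, hs, h5, hb, hc4, List.replicate_succ]
        · have hlt : c + 1 < 5 := by omega
          have hstep : 5 - c = (5 - (c + 1)) + 1 := by omega
          rw [show imaGo (s :: rest) c = imaGo rest (c + 1) by simp [imaGo, hs, h5],
              ih (c + 1) hlt, hb, decide_eq_decide]
          constructor
          · rintro (h | h)
            · refine Or.inl ?_
              rw [hstep, List.replicate_succ, List.cons_prefix_cons]
              exact ⟨rfl, h⟩
            · exact Or.inr (List.infix_cons_iff.mpr (Or.inr h))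
          · rintro (h | h)
            · rw [hstep, List.replicate_succ, List.cons_prefix_cons] at h
              exact Or.inl h.2
            · rcases List.infix_cons_iff.mp h with h | h
              · rw [show (5 : Nat) = 4 + 1 from rfl, List.replicate_succ,
                    List.cons_prefix_cons] at h
                exact Or.inl ((pvRepl_prefix_repl (5 - (c + 1)) 4 (by omega)).trans h.2)
              · exact Or.inr h
      · have hb : pvBits (s :: rest) = '0' :: pvBits rest := by simp [pvBits, hs]
        rw [show imaGo (s :: rest) c = imaGo rest 0 by simp [imaGo, hs],
            ih 0 (by omega), hb, decide_eq_decide]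
        have hstep : 5 - c = (4 - c) + 1 := by omega
        constructor
        · rintro (h | h)
          · exact Or.inr (List.infix_cons_iff.mpr (Or.inr h.isInfix))
          · exact Or.inr (List.infix_cons_iff.mpr (Or.inr h))
        · rintro (h | h)
          · rw [hstep, List.replicate_succ, List.cons_prefix_cons] at h
            exact absurd h.1 (by decide)
          · rcases List.infix_cons_iff.mp h with h | h
            · rw [show (5 : Nat) = 4 + 1 from rfl, List.replicate_succ,
                  List.cons_prefix_cons] at h
              exact absurd h.1 (by decide)
            · exact Or.inr h

-- ===== VERDICT (by name: the statement is the Claim_ definition above) =====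
theorem imaPrelaznuOcenu_spec : Claim_equal_imaPrelaznuOcenu := by
  intro l _
  show imaPrelaznuOcenu l = imaPrelaznuOcenu_alt l
  rw [imaPrelaznuOcenu, imaGo_eq l 0 (by omega)]
  show _ = decide (['1', '1', '1', '1', '1'] <:+: pvBits l)
  rw [decide_eq_decide]
  exact ⟨fun h => h.elim List.IsPrefix.isInfix id, Or.inr⟩
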